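-- pv_equiv track=rewrite | github.com/almlog/ai-dynamic-painting | backend/src/middleware/upload_middleware.py | _validate_filename_security
-- ===== SOURCE A (Python) =====
-- def _validate_filename_security(filename: str) -> bool:
--     """
--     Validate filename for security issues
--
--     Args:
--         filename: Original filename
--
--     Returns:
--         True if filename is safe
--     """
--     if not filename:
--         return False
--
--     # Check for path traversal attacks
--     if '..' in filename or filename.startswith('/') or '\\' in filename:
--         return False
--
--     # Check for dangerous characters
--     dangerous_chars = ['<', '>', '"', '|', ':', '*', '?', ';']
--     if any(char in filename for char in dangerous_chars):
--         return False
--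
--     # Check for control characters
--     if any(ord(char) < 32 for char in filename):
--         return False
--
--     return True
-- ===== SOURCE B (Python) =====
-- def _validate_filename_security(filename: str) -> bool:
--     # Single left-to-right state-machine scan: remembers the previous character
--     # to detect '..' on the fly; '/' is rejected only at position 0.
--     if not filename or filename[0] == '/':
--         return False
--     bad = '\\<>"|:*?;'
--     prev = ''
--     for c in filename:
--         if c in bad or ord(c) < 32 or (c == '.' and prev == '.'):
--             return False
--         prev = c
--     return True
-- ===== Notes on version B (the rewrite author's own statement) =====
-- stated objective: alternative
-- what changed: A's staged substring tests (double-dot search, backslash search, k dangerous-character searches, control-character scan) are replaced by one left-to-right state-machine scan that carries the previous character to detect the double-dot adjacency and rejects a leading slash only at index 0.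
import Mathlib
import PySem

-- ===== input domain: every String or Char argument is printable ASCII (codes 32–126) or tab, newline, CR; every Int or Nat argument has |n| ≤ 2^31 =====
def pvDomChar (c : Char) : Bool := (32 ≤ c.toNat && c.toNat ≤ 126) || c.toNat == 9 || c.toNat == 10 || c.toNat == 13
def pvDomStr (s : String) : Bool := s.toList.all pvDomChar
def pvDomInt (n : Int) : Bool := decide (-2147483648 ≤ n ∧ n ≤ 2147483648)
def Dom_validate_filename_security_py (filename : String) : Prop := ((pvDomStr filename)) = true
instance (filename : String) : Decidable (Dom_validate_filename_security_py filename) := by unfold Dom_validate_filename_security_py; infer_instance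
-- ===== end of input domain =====

-- B replaces A's staged substring searches by one left-to-right state-machine scan
-- whose previous-character state detects the double-dot on the fly; same return value everywhere.

-- ===== PORT A =====
def dangerous_chars : List String := ["<", ">", "\"", "|", ":", "*", "?", ";"]

def validate_filename_security_py (filename : String) : Bool :=
  if filename == "" then false
  else if PySem.Str.isIn ".." filename || PySem.Str.startswith filename "/"
          || PySem.Str.isIn "\\" filename then false
  else if dangerous_chars.any (fun ch => PySem.Str.isIn ch filename) then false
  else if filename.toList.any (fun c => c.toNat < 32) then false
  else true

-- ===== PORT B =====
def badChars : List Char := ['\\', '<', '>', '"', '|', ':', '*', '?', ';']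
def altLoop (prev : Option Char) : List Char → Bool
  | [] => true
  | c :: rest =>
      if badChars.contains c || c.toNat < 32 || (c == '.' && prev == some '.') then false
      else altLoop (some c) rest


def validate_filename_security_py_alt (filename : String) : Bool :=
  if filename == "" || PySem.Str.pyGet? filename 0 == some '/' then false
  else altLoop none filename.toList

-- ===== PRECONDITION & SPEC =====
def Spec_validate_filename_security_py (filename : String) (out : Bool) : Prop := out = validate_filename_security_py_alt filename
instance (filename : String) (out : Bool) : Decidable (Spec_validate_filename_security_py filename out) := by unfold Spec_validate_filename_security_py; infer_instance

-- ===== CLAIM (what is proved, stated in full; the proofs are below) =====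
def Claim_equal_validate_filename_security_py : Prop := ∀ (filename : String), Dom_validate_filename_security_py filename → Spec_validate_filename_security_py filename (validate_filename_security_py filename)

-- ===== LEMMAS AND PROOFS =====
def goodChar (c : Char) : Bool := !badChars.contains c && decide (32 ≤ c.toNat)

-- adjacent double dot, with optional previous character
def ddB (prev : Option Char) : List Char → Bool
  | [] => false
  | c :: rest => (c == '.' && prev == some '.') || ddB (some c) rest

lemma altLoop_eq (l : List Char) : ∀ prev,
    altLoop prev l = (l.all goodChar && !ddB prev l) := by
  induction l with
  | nil => intro prev; simp [altLoop, ddB]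
  | cons c r ih =>
      intro prev
      rw [Bool.eq_iff_iff]
      by_cases hb : badChars.contains c = true <;>
        by_cases hc : c.toNat < 32 <;>
          by_cases hd : (c == '.' && prev == some '.') = true <;>
            simp_all [altLoop, ddB, goodChar, ih] <;> tauto
lemma ddB_some_iff (l : List Char) : ∀ p,
    ddB (some p) l = true ↔ ['.', '.'] <:+: (p :: l) := by
  induction l with
  | nil =>
      intro p
      simp only [ddB, Bool.false_eq_true, false_iff]
      intro h
      have := h.length_le
      simp at this
  | cons c r ih =>
      intro p
      rw [List.infix_cons_iff]
      have hp : (['.', '.'] <+: p :: c :: r) ↔ ('.' = p ∧ '.' = c) := by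
        simp [List.cons_prefix_cons]
      simp only [ddB, Bool.or_eq_true, Bool.and_eq_true, beq_iff_eq, Option.some.injEq, ih c, hp]
      tauto
lemma ddB_none_eq (l : List Char) : ddB none l = PySem.Chars.isIn ['.', '.'] l := by
  rw [Bool.eq_iff_iff, PySem.Chars.isIn_iff_infix]
  cases l with
  | nil =>
      simp only [ddB, Bool.false_eq_true, false_iff]
      intro h; have := h.length_le; simp at this
  | cons c r => simp [ddB, ddB_some_iff]

lemma isIn_single (a : Char) (l : List Char) :
    PySem.Chars.isIn [a] l = l.contains a := by
  by_cases h : a ∈ l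
  · rw [List.contains_iff_mem.mpr h, PySem.Chars.isIn_iff_infix]
    obtain ⟨s, t, hs⟩ := List.append_of_mem h
    exact ⟨s, t, by simp [hs]⟩
  · rw [(PySem.Chars.isIn_eq_false_iff _ _).2, Eq.comm]
    · simpa using h
    · rintro ⟨s, t, hs⟩
      exact h (by rw [← hs]; simp)


-- ===== VERDICT (by name: the statement is the Claim_ definition above) =====
theorem validate_filename_security_py_spec : Claim_equal_validate_filename_security_py := by
  intro f _
  unfold Spec_validate_filename_security_py validate_filename_security_py validate_filename_security_py_alt
  by_cases h0 : f == ""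
  · simp [h0]
  have hne : f.toList ≠ [] := by
    intro h
    rw [beq_iff_eq] at h0
    exact h0 (by rw [← String.ofList_toList (s := f), h])
  obtain ⟨c, r, hl⟩ := List.exists_cons_of_ne_nil hne
  have hget : PySem.Str.pyGet? f 0 = some c := by
    rw [show (0 : Int) = ((0 : Nat) : Int) from rfl, PySem.Str.pyGet?_natCast, hl]
    rfl
  have hstart : PySem.Str.startswith f "/" = (c == '/') := by
    rw [Bool.eq_iff_iff, PySem.Str.startswith_eq, PySem.Chars.startswith_iff, hl]
    simp only [show ("/" : String).toList = ['/'] from rfl, List.cons_prefix_cons,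
      List.nil_prefix, and_true, beq_iff_eq]
    exact eq_comm
  rw [Bool.eq_iff_iff]
  rw [altLoop_eq, ddB_none_eq]
  simp only [h0, hget, hstart, Bool.false_or, beq_iff_eq, Option.some.injEq,
    PySem.Str.isIn_eq, dangerous_chars, List.any_cons, List.any_nil,
    show (".." : String).toList = ['.', '.'] from rfl,
    show ("\\" : String).toList = ['\\'] from rfl,
    show ("<" : String).toList = ['<'] from rfl, show (">" : String).toList = ['>'] from rfl,
    show ("\"" : String).toList = ['"'] from rfl, show ("|" : String).toList = ['|'] from rfl,
    show (":" : String).toList = [':'] from rfl, show ("*" : String).toList = ['*'] from rfl,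
    show ("?" : String).toList = ['?'] from rfl, show (";" : String).toList = [';'] from rfl,
    isIn_single]
  simp only [Bool.if_false_left, List.any_eq_true, List.all_eq_true,
    List.contains_iff_mem, goodChar, decide_eq_true_eq, beq_iff_eq, Bool.and_eq_true,
    Bool.not_eq_true', decide_eq_false_iff_not, Bool.or_eq_true, not_or, badChars]
  constructor
  · rintro ⟨-, ⟨⟨hdd, hsl⟩, hbs⟩, ⟨h1, h2, h3, h4, h5, h6, h7, h8, -⟩, hctl, -⟩
    push Not at hctl
    refine ⟨hsl, fun x hx => ⟨?_, by have := hctl x hx; omega⟩, by simpa using hdd⟩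
    rw [← Bool.not_eq_true, List.contains_iff_mem]
    simp only [List.mem_cons, List.not_mem_nil, or_false, not_or]
    refine ⟨?_, ?_, ?_, ?_, ?_, ?_, ?_, ?_, ?_⟩ <;> rintro rfl
    · exact hbs hx
    · exact h1 hx
    · exact h2 hx
    · exact h3 hx
    · exact h4 hx
    · exact h5 hx
    · exact h6 hx
    · exact h7 hx
    · exact h8 hx
  · rintro ⟨hsl, hall, hdd⟩
    have hmem : ∀ x ∈ f.toList, x ∉ (['\\', '<', '>', '"', '|', ':', '*', '?', ';'] : List Char) := by
      intro x hx hmem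
      have := (hall x hx).1
      rw [← Bool.not_eq_true, List.contains_iff_mem] at this
      exact this hmem
    refine ⟨by simp, ⟨⟨by simp [hdd], hsl⟩, fun h => hmem _ h (by decide)⟩,
      ⟨fun h => hmem _ h (by decide), fun h => hmem _ h (by decide), fun h => hmem _ h (by decide),
       fun h => hmem _ h (by decide), fun h => hmem _ h (by decide), fun h => hmem _ h (by decide),
       fun h => hmem _ h (by decide), fun h => hmem _ h (by decide), by simp⟩,
      ?_, trivial⟩
    rintro ⟨x, hx, hlt⟩
    have := (hall x hx).2
    omega
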